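-- pv_equiv track=rewrite | github.com/guidopastorino/lcc | PROGRAMACIÓN II/practica4.py | ej14
-- ===== SOURCE A (Python) =====
-- def ej14(dic: dict) -> set:
--     if not dic:
--         return set()
--
--     conjuntos_dias = [set(dias) for dias in dic.values()]
--
--     dias_disponibles = set(range(1, 32))
--
--     for dias in conjuntos_dias:
--         dias_disponibles &= dias
--
--     return dias_disponibles
-- ===== SOURCE B (Python) =====
-- def ej14(dic: dict) -> set:
--     if not dic:
--         return set()
--     days = []
--     for v in dic.values():
--         days.extend(set(v))
--     cnt = {}
--     for d in days:
--         cnt[d] = cnt.get(d, 0) + 1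
--     n = len(dic)
--     return {d for d in range(1, 32) if cnt.get(d, 0) == n}
-- ===== Notes on version B (the rewrite author's own statement) =====
-- stated objective: alternative
-- what changed: B replaces A's progressive set-intersection fold by an occurrence-counting algorithm: it counts in a dict how many value-sets each day belongs to and keeps the days 1..31 whose count equals the number of keys.
import Mathlib
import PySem

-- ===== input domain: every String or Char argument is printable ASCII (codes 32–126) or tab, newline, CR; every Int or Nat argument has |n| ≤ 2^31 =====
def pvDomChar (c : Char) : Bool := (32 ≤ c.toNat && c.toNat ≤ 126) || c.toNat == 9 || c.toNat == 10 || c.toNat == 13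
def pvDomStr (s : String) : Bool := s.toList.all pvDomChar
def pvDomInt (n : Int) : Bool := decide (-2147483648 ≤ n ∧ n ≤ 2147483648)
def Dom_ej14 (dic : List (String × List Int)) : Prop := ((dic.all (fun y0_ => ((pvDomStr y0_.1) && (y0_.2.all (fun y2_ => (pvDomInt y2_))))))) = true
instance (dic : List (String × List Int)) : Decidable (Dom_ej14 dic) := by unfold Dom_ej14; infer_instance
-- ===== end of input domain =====

-- B replaces A's intersection fold by counting, per day, in how many value-sets it occurs; same values everywhere.
-- ===== PORT A =====
def ej14 (dic : List (String × List Int)) : List Int :=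
  if dic = [] then []
  else
    let conjuntos_dias : List (PySem.Set Int) := dic.map (fun kv => PySem.Set.ofList kv.2)
    let dias_disponibles : PySem.Set Int := PySem.Set.ofList (PySem.List.pyRange 1 32 1)
    conjuntos_dias.foldl (fun acc s => PySem.Set.inter acc s) dias_disponibles

-- ===== PORT B =====
def ej14_alt (dic : List (String × List Int)) : List Int :=
  if dic = [] then []
  else
    let days : List Int := dic.foldl (fun acc kv => acc ++ PySem.Set.ofList kv.2) []
    let cnt : PySem.Dict Int Int := days.foldl (fun c d => c.insert d (c.getD d 0 + 1)) PySem.Dict.empty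
    let n : Int := dic.length
    (PySem.List.pyRange 1 32 1).filter (fun d => cnt.getD d 0 == n)

-- ===== PRECONDITION & SPEC =====
def Spec_ej14 (dic : List (String × List Int)) (out : List Int) : Prop := out = ej14_alt dic
instance (dic : List (String × List Int)) (out : List Int) : Decidable (Spec_ej14 dic out) := by unfold Spec_ej14; infer_instance

-- ===== CLAIM (what is proved, stated in full; the proofs are below) =====
def Claim_equal_ej14 : Prop := ∀ (dic : List (String × List Int)), Dom_ej14 dic → Spec_ej14 dic (ej14 dic)

-- ===== LEMMAS AND PROOFS =====

-- Folding intersections over a list of sets = filtering the start list by membership in every set.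
theorem foldl_inter_eq_filter_all (sets : List (PySem.Set Int)) (start : List Int) :
    sets.foldl (fun acc s => PySem.Set.inter acc s) start
      = start.filter (fun d => sets.all (fun s => PySem.Set.contains s d)) := by
  induction sets generalizing start with
  | nil => simp
  | cons s rest ih =>
      rw [List.foldl_cons, ih]
      simp only [PySem.Set.inter, List.filter_filter, List.all_cons]
      congr 1
      funext d
      rw [Bool.and_comm]

theorem ofList_pyRange : PySem.Set.ofList (PySem.List.pyRange 1 32 1) = PySem.List.pyRange 1 32 1 := by
  decide

-- the concatenation of the value-sets, as a fold and as a flatMap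
theorem days_eq_flatMap (dic : List (String × List Int)) :
    dic.foldl (fun acc kv => acc ++ PySem.Set.ofList kv.2) []
      = dic.flatMap (fun kv => PySem.Set.ofList kv.2) := by
  have : ∀ acc : List Int,
      dic.foldl (fun acc kv => acc ++ PySem.Set.ofList kv.2) acc
        = acc ++ dic.flatMap (fun kv => PySem.Set.ofList kv.2) := by
    intro acc
    induction dic generalizing acc with
    | nil => simp
    | cons kv rest ih => simp [ih, List.flatMap_cons]
  simpa using this []

-- a day's count over the concatenated nodup sets equals the number of entries iff it is in every set
theorem count_eq_length_iff_all (d : Int) (dic : List (String × List Int)) :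
    ((dic.flatMap (fun kv => PySem.Set.ofList kv.2)).count d = dic.length)
      ↔ (dic.map (fun kv => PySem.Set.ofList kv.2)).all (fun s => PySem.Set.contains s d) = true := by
  induction dic with
  | nil => simp
  | cons kv rest ih =>
      have hle : (rest.flatMap (fun kv => PySem.Set.ofList kv.2)).count d ≤ rest.length := by
        clear ih
        induction rest with
        | nil => simp
        | cons kv' rest' ih' =>
            simp only [List.flatMap_cons, List.count_append, List.length_cons]
            have h1 : List.count d (PySem.Set.ofList kv'.2) ≤ 1 :=
              List.nodup_iff_count_le_one.mp (PySem.Set.nodup_ofList kv'.2) d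
            omega
      have hhead : List.count d (PySem.Set.ofList kv.2)
          = if PySem.Set.contains (PySem.Set.ofList kv.2) d then 1 else 0 := by
        by_cases h : d ∈ PySem.Set.ofList kv.2
        · rw [if_pos ((PySem.Set.contains_iff _ _).mpr h),
            List.count_eq_one_of_mem (PySem.Set.nodup_ofList kv.2) h]
        · rw [if_neg (fun hc => h ((PySem.Set.contains_iff _ _).mp hc)), List.count_eq_zero]
          exact h
      simp only [List.flatMap_cons, List.count_append, List.length_cons, List.map_cons,
        List.all_cons, Bool.and_eq_true, hhead, ← ih]
      by_cases h : PySem.Set.contains (PySem.Set.ofList kv.2) d = true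
      · rw [if_pos h]
        constructor
        · intro he
          exact ⟨h, by omega⟩
        · rintro ⟨-, he⟩
          omega
      · rw [if_neg h]
        constructor
        · intro he
          omega
        · rintro ⟨hc, -⟩
          exact absurd hc h

-- ===== VERDICT (by name: the statement is the Claim_ definition above) =====
theorem ej14_spec : Claim_equal_ej14 := by
  intro dic _
  unfold Spec_ej14 ej14 ej14_alt
  split
  · rfl
  · simp only [foldl_inter_eq_filter_all, ofList_pyRange, days_eq_flatMap,
      PySem.Dict.foldl_insert_getD_add_one_eq_counter, PySem.Dict.getD_counter]
    apply List.filter_congr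
    intro d _
    have h := count_eq_length_iff_all d dic
    rw [Bool.eq_iff_iff]
    simp only [beq_iff_eq]
    constructor
    · intro ha
      exact_mod_cast h.mpr ha
    · intro hc
      exact h.mp (by exact_mod_cast hc)
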